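-- pv_equiv track=rewrite | github.com/j4s0nmo0n/SoaPy2.0 | backup/cache_gen-29-05_13:59.py | get_soaphound_type_id
-- ===== SOURCE A (Python) =====
-- SOAPHOUND_OBJECT_CLASS_MAPPING = {
--     "user": 0,
--     "computer": 1,
--     "group": 2,
--     "groupPolicyContainer": 3,  # Confirmed: GPOs
--     "domainDNS": 4,             # Confirmed: Root Domain
--     "organizationalUnit": 5,    # Confirmed: OUs
--     "container": 6,             # Confirmed: Generic containers (CN=Users, CN=Computers, etc.)
--     "base": 7,
--     "CA": 8,
--     "foreignSecurityPrincipal": 2, # <-- Ajouté pour mapper ForeignSecurityPrincipal à l'ID de groupe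
-- }
--
-- SOAPHOUND_OBJECT_CLASS_PRIORITY = [
--     "computer",  # Déplacé avant "user"
--     "user",
--     "group",
--     "foreignSecurityPrincipal", # Déplacé avant "container"
--     "groupPolicyContainer",
--     "organizationalUnit",
--     "domainDNS",
--     "container",
--     "base",
--     "CA",
-- ]
--
-- def get_soaphound_type_id(dn, object_classes, object_sid, domain_root_dn):
--     """
--     Determines the SOAPHound type ID for an AD object based on objectClass and well-known SIDs.
--     """
--     # Cas spéciaux (SIDs bien connus) - PRIORITÉ LA PLUS HAUTE
--     if object_sid == "S-1-5-32": # Builtin container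
--         return 7
--     if object_sid == "S-1-5-17": # Service Logon Account (c'est un groupe)
--         return 2
--
--     # Cas spécial pour l'objet Domaine lui-même (base de recherche)
--     if dn and domain_root_dn and dn.lower() == domain_root_dn.lower():
--         return 4
--
--     # Appliquer le mapping objectClass basé sur la priorité
--     for oc_priority in SOAPHOUND_OBJECT_CLASS_PRIORITY:
--         if oc_priority in object_classes: # Assurez-vous que object_classes est une liste de chaînes en minuscules
--             type_id = SOAPHOUND_OBJECT_CLASS_MAPPING.get(oc_priority)
--             if type_id is not None:
--                 return type_id
--
--     # Fallback pour les objets qui n'ont pas de mapping direct par objectClass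
--     if dn:
--         if dn.lower().startswith("ou="): # Comparaison en minuscules pour la robustesse
--             return 5
--         elif dn.lower().startswith("cn="):
--             return 6
--
--     return 6 # Fallback par défaut
-- ===== SOURCE B (Python) =====
-- SOAPHOUND_OBJECT_CLASS_MAPPING = {
--     "user": 0,
--     "computer": 1,
--     "group": 2,
--     "groupPolicyContainer": 3,
--     "domainDNS": 4,
--     "organizationalUnit": 5,
--     "container": 6,
--     "base": 7,
--     "CA": 8,
--     "foreignSecurityPrincipal": 2,
-- }
--
-- SOAPHOUND_OBJECT_CLASS_PRIORITY = [
--     "computer",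
--     "user",
--     "group",
--     "foreignSecurityPrincipal",
--     "groupPolicyContainer",
--     "organizationalUnit",
--     "domainDNS",
--     "container",
--     "base",
--     "CA",
-- ]
--
-- # rank + mapped id for every prioritised class, built once at module load
-- _RANK = {oc: (i, SOAPHOUND_OBJECT_CLASS_MAPPING[oc])
--          for i, oc in enumerate(SOAPHOUND_OBJECT_CLASS_PRIORITY)}
--
--
-- def get_soaphound_type_id(dn, object_classes, object_sid, domain_root_dn):
--     if object_sid == "S-1-5-32":
--         return 7
--     if object_sid == "S-1-5-17":
--         return 2
--
--     if dn and domain_root_dn and dn.lower() == domain_root_dn.lower():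
--         return 4
--
--     # single pass over the object's own classes, keeping the best (lowest) rank
--     best = None
--     for oc in object_classes:
--         e = _RANK.get(oc)
--         if e is not None and (best is None or e[0] < best[0]):
--             best = e
--     if best is not None:
--         return best[1]
--
--     if dn:
--         low = dn.lower()
--         if low.startswith("ou="):
--             return 5
--         elif low.startswith("cn="):
--             return 6
--
--     return 6
-- ===== Notes on version B (the rewrite author's own statement) =====
-- stated objective: alternative
-- what changed: Replaces the scan of the fixed priority list (with a membership test into object_classes at each step) by a single pass over object_classes itself, keeping the best (lowest-rank) class via a precomputed rank table; guards and fallbacks unchanged.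
import Mathlib
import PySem

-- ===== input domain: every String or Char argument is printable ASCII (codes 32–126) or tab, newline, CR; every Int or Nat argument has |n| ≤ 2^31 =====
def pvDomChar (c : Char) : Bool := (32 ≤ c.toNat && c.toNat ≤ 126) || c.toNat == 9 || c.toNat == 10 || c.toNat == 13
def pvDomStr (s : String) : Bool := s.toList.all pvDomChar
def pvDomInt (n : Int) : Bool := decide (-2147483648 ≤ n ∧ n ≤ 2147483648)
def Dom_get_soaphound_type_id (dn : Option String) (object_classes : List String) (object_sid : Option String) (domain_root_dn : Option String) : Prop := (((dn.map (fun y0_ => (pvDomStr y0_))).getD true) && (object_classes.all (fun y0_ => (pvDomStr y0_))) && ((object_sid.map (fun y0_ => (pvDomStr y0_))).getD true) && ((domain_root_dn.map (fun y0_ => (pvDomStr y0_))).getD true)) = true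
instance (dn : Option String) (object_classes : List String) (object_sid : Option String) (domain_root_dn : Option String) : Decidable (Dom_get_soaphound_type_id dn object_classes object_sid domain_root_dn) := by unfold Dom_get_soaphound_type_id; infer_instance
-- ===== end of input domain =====

-- B replaces A's scan of the fixed priority list (membership test into object_classes at each
-- step) by one pass over object_classes keeping the best (lowest-rank) class via a rank table;
-- guards and fallbacks are unchanged (objective: alternative decomposition).

-- ===== PORT A =====

-- Python truthiness of an Optional[str] (None and "" are falsy); used by both ports' guards
def pvTruthy (o : Option String) : Bool :=
  match o with
  | none => false
  | some s => s ≠ ""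

-- the guard `dn and domain_root_dn and dn.lower() == domain_root_dn.lower()` (identical in A and B)
def pvIsRoot (dn domain_root_dn : Option String) : Bool :=
  match dn, domain_root_dn with
  | some d, some r => (d ≠ "" : Bool) && (r ≠ "" : Bool) && (PySem.Str.lower d == PySem.Str.lower r)
  | _, _ => false

def SOAPHOUND_OBJECT_CLASS_MAPPING : PySem.Dict String Int := PySem.Dict.mk
  [("user", 0), ("computer", 1), ("group", 2), ("groupPolicyContainer", 3),
   ("domainDNS", 4), ("organizationalUnit", 5), ("container", 6), ("base", 7),
   ("CA", 8), ("foreignSecurityPrincipal", 2)]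

def SOAPHOUND_OBJECT_CLASS_PRIORITY : List String :=
  ["computer", "user", "group", "foreignSecurityPrincipal", "groupPolicyContainer",
   "organizationalUnit", "domainDNS", "container", "base", "CA"]

-- A's `for oc_priority in SOAPHOUND_OBJECT_CLASS_PRIORITY: …` loop (some = early return)
def pvScanA (object_classes : List String) : List String → Option Int
  | [] => none
  | p :: ps =>
    if object_classes.contains p then
      match SOAPHOUND_OBJECT_CLASS_MAPPING.get? p with
      | some t => some t
      | none => pvScanA object_classes ps
    else pvScanA object_classes ps

def get_soaphound_type_id (dn : Option String) (object_classes : List String) (object_sid : Option String) (domain_root_dn : Option String) : Int :=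
  if object_sid == some "S-1-5-32" then 7
  else if object_sid == some "S-1-5-17" then 2
  else if pvIsRoot dn domain_root_dn then 4
  else
    match pvScanA object_classes SOAPHOUND_OBJECT_CLASS_PRIORITY with
    | some type_id => type_id
    | none =>
      if pvTruthy dn then
        if PySem.Str.startswith (PySem.Str.lower (dn.getD "")) "ou=" then 5
        else if PySem.Str.startswith (PySem.Str.lower (dn.getD "")) "cn=" then 6
        else 6
      else 6

-- ===== PORT B =====

-- module-level dict comprehension `{oc: (i, MAPPING[oc]) for i, oc in enumerate(PRIORITY)}`,
-- written out over the two concrete module constants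
def pvRANK : PySem.Dict String (Int × Int) := PySem.Dict.mk
  [("computer", (0, 1)), ("user", (1, 0)), ("group", (2, 2)),
   ("foreignSecurityPrincipal", (3, 2)), ("groupPolicyContainer", (4, 3)),
   ("organizationalUnit", (5, 5)), ("domainDNS", (6, 4)), ("container", (7, 6)),
   ("base", (8, 7)), ("CA", (9, 8))]

-- the body of B's `for oc in object_classes:` loop, state `best`
def pvStepB (best : Option (Int × Int)) (oc : String) : Option (Int × Int) :=
  match pvRANK.get? oc with
  | none => best
  | some e =>
    match best with
    | none => some e
    | some b => if e.1 < b.1 then some e else best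

def get_soaphound_type_id_alt (dn : Option String) (object_classes : List String) (object_sid : Option String) (domain_root_dn : Option String) : Int :=
  if object_sid == some "S-1-5-32" then 7
  else if object_sid == some "S-1-5-17" then 2
  else if pvIsRoot dn domain_root_dn then 4
  else
    match object_classes.foldl pvStepB none with
    | some best => best.2
    | none =>
      if pvTruthy dn then
        let low := PySem.Str.lower (dn.getD "")
        if PySem.Str.startswith low "ou=" then 5
        else if PySem.Str.startswith low "cn=" then 6
        else 6
      else 6

-- ===== PRECONDITION & SPEC =====
def Spec_get_soaphound_type_id (dn : Option String) (object_classes : List String) (object_sid : Option String) (domain_root_dn : Option String) (out : Int) : Prop := out = get_soaphound_type_id_alt dn object_classes object_sid domain_root_dn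
instance (dn : Option String) (object_classes : List String) (object_sid : Option String) (domain_root_dn : Option String) (out : Int) : Decidable (Spec_get_soaphound_type_id dn object_classes object_sid domain_root_dn out) := by unfold Spec_get_soaphound_type_id; infer_instance

-- ===== CLAIM (what is proved, stated in full; the proofs are below) =====
def Claim_equal_get_soaphound_type_id : Prop := ∀ (dn : Option String) (object_classes : List String) (object_sid : Option String) (domain_root_dn : Option String), Dom_get_soaphound_type_id dn object_classes object_sid domain_root_dn → Spec_get_soaphound_type_id dn object_classes object_sid domain_root_dn (get_soaphound_type_id dn object_classes object_sid domain_root_dn)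

-- ===== LEMMAS AND PROOFS =====

-- left-biased minimum by rank; pvStepB best oc = pvOmin best (pvRANK.get? oc)
def pvOmin (a b : Option (Int × Int)) : Option (Int × Int) :=
  match b with
  | none => a
  | some e =>
    match a with
    | none => some e
    | some x => if e.1 < x.1 then some e else a

theorem pvStepB_eq (best : Option (Int × Int)) (oc : String) :
    pvStepB best oc = pvOmin best (pvRANK.get? oc) := by
  unfold pvStepB pvOmin
  cases pvRANK.get? oc <;> cases best <;> rfl

theorem pvOmin_none_left (b : Option (Int × Int)) : pvOmin none b = b := by
  cases b <;> rfl

theorem pvOmin_assoc (a b c : Option (Int × Int)) :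
    pvOmin (pvOmin a b) c = pvOmin a (pvOmin b c) := by
  rcases c with _ | z
  · rfl
  rcases b with _ | y
  · rfl
  rcases a with _ | x
  · simp [pvOmin_none_left]
  by_cases hyx : y.1 < x.1
  · by_cases hzy : z.1 < y.1
    · have hzx : z.1 < x.1 := lt_trans hzy hyx
      simp [pvOmin, hyx, hzy, hzx]
    · simp [pvOmin, hyx, hzy]
  · by_cases hzx : z.1 < x.1
    · by_cases hzy : z.1 < y.1
      · simp [pvOmin, hyx, hzx, hzy]
      · exact absurd hzx (by omega)
    · by_cases hzy : z.1 < y.1 <;> simp [pvOmin, hyx, hzx, hzy]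

-- B's fold from an arbitrary accumulator, split off the accumulator
theorem pvFold_split (t : List String) : ∀ acc : Option (Int × Int),
    t.foldl pvStepB acc = pvOmin acc (t.foldl pvStepB none) := by
  induction t with
  | nil => intro acc; cases acc <;> rfl
  | cons x t ih =>
    intro acc
    simp only [List.foldl_cons]
    rw [ih (pvStepB acc x), ih (pvStepB none x), pvStepB_eq, pvStepB_eq,
        pvOmin_none_left, pvOmin_assoc]

-- the closed form of B's loop result: the first priority class present, with its rank and id
def pvChain (ocs : List String) : Option (Int × Int) :=
  if ocs.contains "computer" then some (0, 1)
  else if ocs.contains "user" then some (1, 0)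
  else if ocs.contains "group" then some (2, 2)
  else if ocs.contains "foreignSecurityPrincipal" then some (3, 2)
  else if ocs.contains "groupPolicyContainer" then some (4, 3)
  else if ocs.contains "organizationalUnit" then some (5, 5)
  else if ocs.contains "domainDNS" then some (6, 4)
  else if ocs.contains "container" then some (7, 6)
  else if ocs.contains "base" then some (8, 7)
  else if ocs.contains "CA" then some (9, 8)
  else none

set_option maxHeartbeats 1000000 in
theorem pvFoldB_eq_chain : ∀ ocs : List String, ocs.foldl pvStepB none = pvChain ocs := by
  intro ocs
  induction ocs with
  | nil => rfl
  | cons oc t ih =>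
    rw [List.foldl_cons, pvFold_split, ih, pvStepB_eq, pvOmin_none_left]
    by_cases h0 : oc = "computer"
    · subst h0
      rw [show pvRANK.get? "computer" = some ((0 : Int), (1 : Int)) from rfl]
      simp only [pvChain, List.contains_cons]
      simp only [apply_ite (pvOmin (some ((0 : Int), (1 : Int))))]
      simp [pvOmin]
    by_cases h1 : oc = "user"
    · subst h1
      rw [show pvRANK.get? "user" = some ((1 : Int), (0 : Int)) from rfl]
      simp only [pvChain, List.contains_cons]
      simp only [apply_ite (pvOmin (some ((1 : Int), (0 : Int))))]
      simp [pvOmin]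
    by_cases h2 : oc = "group"
    · subst h2
      rw [show pvRANK.get? "group" = some ((2 : Int), (2 : Int)) from rfl]
      simp only [pvChain, List.contains_cons]
      simp only [apply_ite (pvOmin (some ((2 : Int), (2 : Int))))]
      simp [pvOmin]
    by_cases h3 : oc = "foreignSecurityPrincipal"
    · subst h3
      rw [show pvRANK.get? "foreignSecurityPrincipal" = some ((3 : Int), (2 : Int)) from rfl]
      simp only [pvChain, List.contains_cons]
      simp only [apply_ite (pvOmin (some ((3 : Int), (2 : Int))))]
      simp [pvOmin]
    by_cases h4 : oc = "groupPolicyContainer"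
    · subst h4
      rw [show pvRANK.get? "groupPolicyContainer" = some ((4 : Int), (3 : Int)) from rfl]
      simp only [pvChain, List.contains_cons]
      simp only [apply_ite (pvOmin (some ((4 : Int), (3 : Int))))]
      simp [pvOmin]
    by_cases h5 : oc = "organizationalUnit"
    · subst h5
      rw [show pvRANK.get? "organizationalUnit" = some ((5 : Int), (5 : Int)) from rfl]
      simp only [pvChain, List.contains_cons]
      simp only [apply_ite (pvOmin (some ((5 : Int), (5 : Int))))]
      simp [pvOmin]
    by_cases h6 : oc = "domainDNS"
    · subst h6
      rw [show pvRANK.get? "domainDNS" = some ((6 : Int), (4 : Int)) from rfl]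
      simp only [pvChain, List.contains_cons]
      simp only [apply_ite (pvOmin (some ((6 : Int), (4 : Int))))]
      simp [pvOmin]
    by_cases h7 : oc = "container"
    · subst h7
      rw [show pvRANK.get? "container" = some ((7 : Int), (6 : Int)) from rfl]
      simp only [pvChain, List.contains_cons]
      simp only [apply_ite (pvOmin (some ((7 : Int), (6 : Int))))]
      simp [pvOmin]
    by_cases h8 : oc = "base"
    · subst h8
      rw [show pvRANK.get? "base" = some ((8 : Int), (7 : Int)) from rfl]
      simp only [pvChain, List.contains_cons]
      simp only [apply_ite (pvOmin (some ((8 : Int), (7 : Int))))]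
      simp [pvOmin]
    by_cases h9 : oc = "CA"
    · subst h9
      rw [show pvRANK.get? "CA" = some ((9 : Int), (8 : Int)) from rfl]
      simp only [pvChain, List.contains_cons]
      simp only [apply_ite (pvOmin (some ((9 : Int), (8 : Int))))]
      simp [pvOmin]
    have hr : pvRANK.get? oc = none := by
      simp [pvRANK, PySem.Dict.get?]
      exact ⟨fun e => h0 e.symm, fun e => h1 e.symm, fun e => h2 e.symm, fun e => h3 e.symm,
             fun e => h4 e.symm, fun e => h5 e.symm, fun e => h6 e.symm, fun e => h7 e.symm,
             fun e => h8 e.symm, fun e => h9 e.symm⟩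
    rw [hr, pvOmin_none_left]
    simp only [pvChain, List.contains_cons]
    simp [Ne.symm h0, Ne.symm h1, Ne.symm h2, Ne.symm h3, Ne.symm h4, Ne.symm h5, Ne.symm h6, Ne.symm h7, Ne.symm h8, Ne.symm h9]

-- A's scan over the concrete priority list is the same chain, mapped to the type id
set_option maxHeartbeats 1000000 in
theorem pvScanA_eq_chain (ocs : List String) :
    pvScanA ocs SOAPHOUND_OBJECT_CLASS_PRIORITY = (pvChain ocs).map (·.2) := by
  simp only [SOAPHOUND_OBJECT_CLASS_PRIORITY, pvScanA,
    show SOAPHOUND_OBJECT_CLASS_MAPPING.get? "computer" = some 1 from rfl,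
    show SOAPHOUND_OBJECT_CLASS_MAPPING.get? "user" = some 0 from rfl,
    show SOAPHOUND_OBJECT_CLASS_MAPPING.get? "group" = some 2 from rfl,
    show SOAPHOUND_OBJECT_CLASS_MAPPING.get? "foreignSecurityPrincipal" = some 2 from rfl,
    show SOAPHOUND_OBJECT_CLASS_MAPPING.get? "groupPolicyContainer" = some 3 from rfl,
    show SOAPHOUND_OBJECT_CLASS_MAPPING.get? "organizationalUnit" = some 5 from rfl,
    show SOAPHOUND_OBJECT_CLASS_MAPPING.get? "domainDNS" = some 4 from rfl,
    show SOAPHOUND_OBJECT_CLASS_MAPPING.get? "container" = some 6 from rfl,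
    show SOAPHOUND_OBJECT_CLASS_MAPPING.get? "base" = some 7 from rfl,
    show SOAPHOUND_OBJECT_CLASS_MAPPING.get? "CA" = some 8 from rfl]
  unfold pvChain
  split_ifs <;> rfl

-- ===== VERDICT (by name: the statement is the Claim_ definition above) =====
theorem get_soaphound_type_id_spec : Claim_equal_get_soaphound_type_id := by
  intro dn ocs sid drd _
  unfold Spec_get_soaphound_type_id get_soaphound_type_id get_soaphound_type_id_alt
  rw [pvScanA_eq_chain, pvFoldB_eq_chain]
  cases pvChain ocs <;> rfl
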